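-- pv_equiv track=rewrite | github.com/life-f0rm/cryptography2023 | hw1_double_vigenere_proof.py | combine_keys
-- ===== SOURCE A (Python) =====
-- def combine_keys(k1, k2, length):
--     """
--     Combine two keys to create a new key of a specified length.
--
--     Args:
--         k1 (str): The first key.
--         k2 (str): The second key.
--         length (int): The length of the new key.
--
--     Returns:
--         str: The combined key.
--     """
--     # Initialize an empty string to store the combined key
--     k3 = ""
--
--     # Iterate over each index in the range of the specified length
--     for i in range(length):
--         # Calculate the shift for the current character in k1
--         shift_k1 = ord(k1[i % len(k1)]) - ord('A')
--
--         # Calculate the shift for the current character in k2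
--         shift_k2 = ord(k2[i % len(k2)]) - ord('A')
--
--         # Combine the shifts by taking the sum modulo 26
--         combined_shift = (shift_k1 + shift_k2) % 26
--
--         # Convert the combined shift back to a character and append it to k3
--         k3 += chr(combined_shift + ord('A'))
--
--     # Return the combined key
--     return k3
-- ===== SOURCE B (Python) =====
-- def combine_keys(k1, k2, length):
--     if length <= 0:
--         return ""
--     # tile each key out to the requested length, then combine position-wise
--     r1 = (k1 * (length // len(k1) + 1))[:length]
--     r2 = (k2 * (length // len(k2) + 1))[:length]
--     A = ord('A')
--     return "".join(chr((ord(a) + ord(b) - 2 * A) % 26 + A) for a, b in zip(r1, r2))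
-- ===== Notes on version B (the rewrite author's own statement) =====
-- stated objective: alternative
-- what changed: B replaces A's per-index modular lookups and quadratic-prone string concatenation with a tile-then-zip decomposition: each key is repeated and sliced to the target length once, and the output is one ''.join over a pairwise map of the two tiled strings.
import Mathlib
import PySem

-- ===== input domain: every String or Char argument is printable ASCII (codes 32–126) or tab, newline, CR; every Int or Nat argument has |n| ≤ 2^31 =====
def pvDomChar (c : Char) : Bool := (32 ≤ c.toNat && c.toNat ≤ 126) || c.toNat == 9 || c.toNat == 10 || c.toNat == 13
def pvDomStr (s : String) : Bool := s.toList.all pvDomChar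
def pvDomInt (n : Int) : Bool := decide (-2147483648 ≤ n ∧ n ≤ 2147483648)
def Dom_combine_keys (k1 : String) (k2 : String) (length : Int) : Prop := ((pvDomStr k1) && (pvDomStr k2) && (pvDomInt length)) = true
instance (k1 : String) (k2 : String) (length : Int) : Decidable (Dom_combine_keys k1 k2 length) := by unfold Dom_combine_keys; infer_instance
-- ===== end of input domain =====

-- B combines the keys by tiling each key out to the target length and mapping the shift-sum over the
-- zip of the two tiled strings, instead of A's per-output-index modular lookups (objective: alternative).

-- ===== PORT A =====
-- literal port of A: for i in range(length), index both keys at i % len, append chr((shift1+shift2) % 26 + 65);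
-- pyGetD's default is never read (0 ≤ i % len < len under Pre_), and i % 0 (Python's ZeroDivisionError) is outside Pre_.
def combine_keys (k1 : String) (k2 : String) (length : Int) : String :=
  let l1 := k1.toList
  let l2 := k2.toList
  let k3 := (PySem.List.pyRange 0 length 1).foldl (fun acc i =>
    let shift1 : Int := ((PySem.List.pyGetD l1 (PySem.Int.mod i (l1.length : Int)) 'A').toNat : Int) - 65
    let shift2 : Int := ((PySem.List.pyGetD l2 (PySem.Int.mod i (l2.length : Int)) 'A').toNat : Int) - 65
    let combined := PySem.Int.mod (shift1 + shift2) 26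
    acc ++ [Char.ofNat (combined + 65).toNat]) []
  String.ofList k3

-- ===== PORT B =====
-- literal port of B: guard length <= 0, tile each key (k * (length//len(k) + 1))[:length], zip and map
def combine_keys_alt (k1 : String) (k2 : String) (length : Int) : String :=
  if length ≤ 0 then "" else
  let l1 := k1.toList
  let l2 := k2.toList
  let r1 := PySem.List.slice (PySem.List.pyRepeat l1 (PySem.Int.floordiv length (l1.length : Int) + 1)) none (some length)
  let r2 := PySem.List.slice (PySem.List.pyRepeat l2 (PySem.Int.floordiv length (l2.length : Int) + 1)) none (some length)
  String.ofList ((r1.zip r2).map (fun p =>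
    Char.ofNat (PySem.Int.mod (((p.1.toNat : Int) + (p.2.toNat : Int)) - 130) 26 + 65).toNat))

-- ===== PRECONDITION & SPEC =====
-- Pre_ excludes exactly the inputs where Python A raises: with length > 0 and an empty key,
-- A's 'i % len(k)' raises ZeroDivisionError (B's 'length // len(k)' raises there too).
def Pre_combine_keys (k1 : String) (k2 : String) (length : Int) : Prop :=
  length ≤ 0 ∨ (k1 ≠ "" ∧ k2 ≠ "")
instance (k1 : String) (k2 : String) (length : Int) : Decidable (Pre_combine_keys k1 k2 length) := by unfold Pre_combine_keys; infer_instance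
def pvWitness_combine_keys : String × String × Int := ("AB", "CDE", 7)

def Spec_combine_keys (k1 : String) (k2 : String) (length : Int) (out : String) : Prop := out = combine_keys_alt k1 k2 length
instance (k1 : String) (k2 : String) (length : Int) (out : String) : Decidable (Spec_combine_keys k1 k2 length out) := by unfold Spec_combine_keys; infer_instance

-- ===== CLAIM (what is proved, stated in full; the proofs are below) =====
def Claim_equal_combine_keys : Prop := ∀ (k1 : String) (k2 : String) (length : Int), Dom_combine_keys k1 k2 length → Pre_combine_keys k1 k2 length → Spec_combine_keys k1 k2 length (combine_keys k1 k2 length)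

-- ===== LEMMAS AND PROOFS =====

-- indexing into a flattened replication is indexing modulo the block length
lemma getElem?_flatten_replicate {α : Type} (l : List α) (m j : Nat)
    (hj : j < m * l.length) :
    (List.replicate m l).flatten[j]? = l[j % l.length]? := by
  induction m generalizing j with
  | zero => omega
  | succ m ih =>
    rw [Nat.succ_mul] at hj
    rw [List.replicate_succ, List.flatten_cons]
    by_cases h : j < l.length
    · rw [List.getElem?_append_left h, Nat.mod_eq_of_lt h]
    · rw [List.getElem?_append_right (by omega), ih (j - l.length) (by omega)]
      congr 1
      conv_rhs => rw [show j = l.length + (j - l.length) by omega]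
      rw [Nat.add_mod_left]

-- the tiled-and-truncated list, pointwise: position j holds l[j % l.length]
lemma take_flatten_replicate_eq_map_range {α : Type} (l : List α) (d : α) (m L : Nat)
    (hl : l ≠ []) (hL : L ≤ m * l.length) :
    List.take L (List.replicate m l).flatten = (List.range L).map (fun j => l.getD (j % l.length) d) := by
  have hn : 0 < l.length := List.length_pos_iff.mpr hl
  apply List.ext_getElem?
  intro i
  by_cases hi : i < L
  · rw [List.getElem?_take_of_lt hi, getElem?_flatten_replicate l m i (by omega),
        List.getElem?_map, List.getElem?_range hi]
    have him : i % l.length < l.length := Nat.mod_lt _ hn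
    simp [List.getElem?_eq_getElem him]
  · rw [List.getElem?_eq_none (by simpa using by omega), List.getElem?_eq_none (by simpa using by omega)]

-- ===== VERDICT (by name: the statement is the Claim_ definition above) =====
theorem combine_keys_spec : Claim_equal_combine_keys := by
  intro k1 k2 length _ hpre
  unfold Spec_combine_keys combine_keys combine_keys_alt
  by_cases hl : length ≤ 0
  · simp [hl, PySem.List.pyRange_one_eq_nil hl]
  · replace hl : 0 < length := by omega
    obtain hle | ⟨hk1, hk2⟩ := hpre
    · omega
    have h1 : k1.toList ≠ [] := fun h => hk1 (by simpa using congrArg String.ofList h)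
    have h2 : k2.toList ≠ [] := fun h => hk2 (by simpa using congrArg String.ofList h)
    have hn1 : 0 < k1.toList.length := List.length_pos_iff.mpr h1
    have hn2 : 0 < k2.toList.length := List.length_pos_iff.mpr h2
    rw [if_neg (by omega)]
    -- tiling bound: length.toNat ≤ (length // n + 1).toNat * n for each key
    have hbound : ∀ (N : Nat), 0 < N →
        length.toNat ≤ (PySem.Int.floordiv length (N : Int) + 1).toNat * N := by
      intro N hN
      have hNpos : (0 : Int) < (N : Int) := by exact_mod_cast hN
      have hq0 : 0 ≤ PySem.Int.floordiv length (N : Int) := by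
        rw [PySem.Int.floordiv_eq_ediv_of_pos hNpos]
        exact Int.ediv_nonneg (le_of_lt hl) (le_of_lt hNpos)
      have hqm := PySem.Int.floordiv_mul_add_mod length (N : Int)
      have hmlt := PySem.Int.mod_lt length hNpos
      have hInt : length ≤ (PySem.Int.floordiv length (N : Int) + 1) * (N : Int) := by nlinarith
      have : ((PySem.Int.floordiv length (N : Int) + 1).toNat * N : Int)
          = (PySem.Int.floordiv length (N : Int) + 1) * (N : Int) := by
        push_cast [Int.toNat_of_nonneg (by omega : 0 ≤ PySem.Int.floordiv length (N : Int) + 1)]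
        ring
      have hcast : (length.toNat : Int) = length := Int.toNat_of_nonneg (le_of_lt hl)
      exact_mod_cast (by rw [this, hcast]; exact hInt :
        (length.toNat : Int) ≤ ((PySem.Int.floordiv length (N : Int) + 1).toNat * N : Int))
    dsimp only
    rw [PySem.List.foldl_append_singleton_eq_map, PySem.List.pyRange_one,
        PySem.List.slice_to _ (le_of_lt hl), PySem.List.slice_to _ (le_of_lt hl)]
    simp only [PySem.List.pyRepeat]
    rw [take_flatten_replicate_eq_map_range k1.toList 'A' _ _ h1 (hbound _ hn1),
        take_flatten_replicate_eq_map_range k2.toList 'A' _ _ h2 (hbound _ hn2),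
        List.zip_map', List.map_map, List.map_map]
    congr 1
    rw [List.nil_append, sub_zero]
    apply List.map_congr_left
    intro k hk
    simp only [Function.comp, zero_add, PySem.Int.mod_natCast, PySem.List.pyGetD_natCast]
    have harg : ∀ x y : Int, x - 65 + (y - 65) = x + y - 130 := by intros; ring
    rw [harg]
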